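/- GENERATED by tools/from_farm_form.py from prooffarm-gif/accepted/DGifOpen.1/Proof.lean (a worked proof of the farm's unit `DGifOpen.1`,
   accepted by the verdict) — do not edit. -/
import Gif.Spec.Units.DGifOpen_1
import Gif.Spec.AllSegs
import Gif.Spec.Proved.DGifOpen_1_Lemmas

open X86 X86.User Asan ProgX.Base ProgX.Base.Spec Gif.Spec

/-!
  `DGifOpen.1` (0x1086d0 … 0x10871a and 0x108834 … 0x10884b, 23 instructions; dgif_lib.c:172-184): segment 1 of the PROTECTED
  function `DGifOpen`: `malloc(120)`; NULL: the checked store `*Error = 109` (if `Error ≠ NULL`), to the epilogue with the entry's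
  heap; otherwise `memset(gif, 0, 120)` and the two checked stores `SavedImages = NULL`, `SColorMap = NULL`, on to the cut before
  `calloc` with the heap `H.push 120 (r16 120)` and `gif = H.next` owned and zero-filled.

  The return addresses of `malloc` (0x1086da, `ret1`) and `memset` (0x1086f8, `ret2`) are not cuts of the design, so the unit makes
  them cuts of its own: the private assertions `dgo1_AtRet1`, `dgo1_AtRet2` and four walks (Lemmas.lean), chained here. Which arm is
  taken behind `malloc` is decided by `H.Fits (r16 120)` (`AllocPost`): both arms are ordinary paths.
-/

namespace Gif.Spec.DGifOpen_1
end Gif.Spec.DGifOpen_1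

/-- Segment 1 of `DGifOpen` takes `Body` at 0x1086d0 to `AfterGif` at 0x10871a or to `Exit` at 0x108816. -/
theorem Gif.Spec.Proved.DGifOpen_1_ok : Gif.Spec.DGifOpen_1.Statement := by
  unfold Gif.Spec.DGifOpen_1.Statement
  intro Lay hLay μ hμ u₀ hcode h_malloc h_memset h_asan_store8_noabort h_asan_store4_noabort
  intro H rest frames R e ret v hat
  -- the callees' contracts for the frame list of the body (the own frame in front)
  have hmalloc := h_malloc H rest (DGifOpen.framesIn frames e)
  have hmemset := h_memset ((H.push 120 (r16 120)).liveObjs ++ rest) (DGifOpen.framesIn frames e)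
  -- 0x1086d0 … `call malloc` … 0x1086da (dgif_lib.c:172)
  refine (Gif.Spec.DGifOpen_1.dgo1_seg_malloc Lay hLay μ hμ u₀ hcode H rest frames R e ret hmalloc v hat).trans ?_
  intro v1 hv1
  by_cases hfit : H.Fits (r16 120)
  · -- ROOM: 0x1086da … `call memset` … 0x1086f8 (dgif_lib.c:173-180)
    refine (Gif.Spec.DGifOpen_1.dgo1_seg_memset Lay hLay μ hμ u₀ hcode H rest frames R e ret hmemset v1 hv1 hfit).trans ?_
    intro v2 hv2
    -- 0x1086f8 … 0x10871a (dgif_lib.c:183-184): the two checked stores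
    refine (Gif.Spec.DGifOpen_1.dgo1_seg_stores Lay hLay μ hμ u₀ hcode H rest frames R e ret h_asan_store8_noabort
      v2 hv2).mono ?_
    intro w hw
    exact Or.inl ⟨H.push 120 (r16 120), H.next, hw⟩
  · -- NO ROOM: 0x1086da … 0x108834 … 0x108816 (dgif_lib.c:173-177): NULL, `*Error = 109`
    refine (Gif.Spec.DGifOpen_1.dgo1_seg_null Lay hLay μ hμ u₀ hcode H rest frames R e ret h_asan_store4_noabort
      v1 hv1 hfit).mono ?_
    intro w hw
    exact Or.inr hw
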